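-- pv_equiv track=rewrite | github.com/rafamdr/coding_chanllenges | contained_items/main.py | contained_items_v4
-- ===== SOURCE A (Python) =====
-- from typing import List, Dict
--
-- def contained_items_v4(text: str, indices: List[tuple[int, int]]) -> Dict[tuple[int, int], int]:
--     local_count, state = 0, 1
--     indices_dict, result_dict = {}, {}
--     for (start, end) in indices:
--         indices_dict[(start, end)], result_dict[(start, end)] = [0, 0], 0
--     for i, ch in enumerate(text):
--         for (start, end) in indices_dict:
--             if start <= i < end:
--                 if ch == '|':
--                     result_dict[(start, end)] += indices_dict[(start, end)][local_count]
--                     indices_dict[(start, end)] = [0, 1]  # local_count = 0, state = 1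
--                 else:
--                     indices_dict[(start, end)][local_count] += indices_dict[(start, end)][state]
--     return result_dict
-- ===== SOURCE B (Python) =====
-- def contained_items_v4(text, indices):
--     result = {}
--     for key in indices:
--         if key in result:
--             continue
--         s, e = key
--         seg = text[max(s, 0):max(e, 0)]
--         first = seg.find('|')
--         if first == -1:
--             result[key] = 0
--         else:
--             last = len(seg) - 1 - seg[::-1].find('|')
--             inner = seg[first + 1:last]
--             result[key] = len(inner) - inner.count('|')
--     return result
-- ===== Notes on version B (the rewrite author's own statement) =====
-- stated objective: faster
-- what changed: Instead of running a per-interval two-cell state machine over every (character, interval) pair, B slices each distinct interval out of the text once, locates the first and last '|' with find on the slice and its reverse, and counts the non-bar characters between them by length minus count.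
import Mathlib
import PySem

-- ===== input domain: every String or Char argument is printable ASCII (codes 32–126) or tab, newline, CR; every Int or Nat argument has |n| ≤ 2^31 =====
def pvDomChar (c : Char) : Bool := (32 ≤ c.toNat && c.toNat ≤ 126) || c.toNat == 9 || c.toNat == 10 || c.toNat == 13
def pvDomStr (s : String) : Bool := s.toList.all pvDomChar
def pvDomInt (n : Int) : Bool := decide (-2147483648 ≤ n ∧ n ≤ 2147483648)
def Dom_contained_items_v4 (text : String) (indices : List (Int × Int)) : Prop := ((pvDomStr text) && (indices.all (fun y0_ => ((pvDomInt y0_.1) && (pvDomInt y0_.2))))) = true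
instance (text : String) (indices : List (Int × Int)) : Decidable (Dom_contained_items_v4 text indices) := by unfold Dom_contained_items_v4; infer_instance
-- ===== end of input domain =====

-- ===== PORT A =====
-- B replaces A's per-(character, interval) state machine by slicing each distinct interval once and
-- counting the non-'|' characters between the first and last '|' of the slice.

-- inner-loop body of A; the list indices 0 and 1 are Python's variables local_count = 0, state = 1
def pvAStep (i : Int) (ch : Char)
    (q : PySem.Dict (Int × Int) (List Int) × PySem.Dict (Int × Int) Int)
    (se : Int × Int) :
    PySem.Dict (Int × Int) (List Int) × PySem.Dict (Int × Int) Int :=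
  if se.1 ≤ i ∧ i < se.2 then
    if ch = '|' then
      (q.1.insert se [0, 1],
       q.2.insert se (q.2.getD se 0 + PySem.List.pyGetD (q.1.getD se []) 0 0))
    else
      (q.1.insert se
         [PySem.List.pyGetD (q.1.getD se []) 0 0 + PySem.List.pyGetD (q.1.getD se []) 1 0,
          PySem.List.pyGetD (q.1.getD se []) 1 0],
       q.2)
  else q

def contained_items_v4 (text : String) (indices : List (Int × Int)) : List (Int × Int × Int) :=
  let init := indices.foldl
    (fun (p : PySem.Dict (Int × Int) (List Int) × PySem.Dict (Int × Int) Int) se =>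
      (p.1.insert se [0, 0], p.2.insert se 0))
    (PySem.Dict.empty, PySem.Dict.empty)
  let final := (PySem.List.enumerate text.toList 0).foldl
    (fun q ic => q.1.keys.foldl (pvAStep ic.1 ic.2) q)
    init
  final.2.items.map (fun kv => (kv.1.1, kv.1.2, kv.2))

-- ===== PORT B =====
-- value B stores for one interval: slice the interval out, find the first and last '|', count non-bars between
def pvBVal (text : String) (key : Int × Int) : Int :=
  let seg := PySem.Str.slice text (some (max key.1 0)) (some (max key.2 0))
  let first := PySem.Str.find seg "|"
  if first = -1 then 0
  else
    let lastI := PySem.Str.len seg - 1 -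
      PySem.Str.find ((PySem.Str.slice? seg none none (-1)).getD "") "|"
    let inner := PySem.Str.slice seg (some (first + 1)) (some lastI)
    PySem.Str.len inner - (PySem.Str.count inner "|" : Int)

def contained_items_v4_alt (text : String) (indices : List (Int × Int)) : List (Int × Int × Int) :=
  (indices.foldl
    (fun (r : PySem.Dict (Int × Int) Int) key =>
      if r.contains key then r else r.insert key (pvBVal text key))
    PySem.Dict.empty).items.map (fun kv => (kv.1.1, kv.1.2, kv.2))

-- ===== PRECONDITION & SPEC =====
def Spec_contained_items_v4 (text : String) (indices : List (Int × Int)) (out : List (Int × Int × Int)) : Prop := out = contained_items_v4_alt text indices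
instance (text : String) (indices : List (Int × Int)) (out : List (Int × Int × Int)) : Decidable (Spec_contained_items_v4 text indices out) := by unfold Spec_contained_items_v4; infer_instance

-- ===== CLAIM (what is proved, stated in full; the proofs are below) =====
def Claim_equal_contained_items_v4 : Prop := ∀ (text : String) (indices : List (Int × Int)), Dom_contained_items_v4 text indices → Spec_contained_items_v4 text indices (contained_items_v4 text indices)

-- ===== LEMMAS AND PROOFS =====

-- per-interval state machine of A, with the dict bookkeeping stripped away
def pvM (st : List Int × Int) (c : Char) : List Int × Int :=
  if c = '|' then ([0, 1], st.2 + PySem.List.pyGetD st.1 0 0)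
  else ([PySem.List.pyGetD st.1 0 0 + PySem.List.pyGetD st.1 1 0, PySem.List.pyGetD st.1 1 0], st.2)

def pvSim (se : Int × Int) (st : List Int × Int) (ic : Int × Char) : List Int × Int :=
  if se.1 ≤ ic.1 ∧ ic.1 < se.2 then pvM st ic.2 else st

lemma pv_init_split (l : List (Int × Int)) (d1 : PySem.Dict (Int × Int) (List Int))
    (d2 : PySem.Dict (Int × Int) Int) :
    l.foldl (fun p se => (p.1.insert se [0, 0], p.2.insert se 0)) (d1, d2)
      = (l.foldl (fun d se => d.insert se [0, 0]) d1, l.foldl (fun d se => d.insert se 0) d2) := by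
  induction l generalizing d1 d2 with
  | nil => rfl
  | cons x t ih => simpa using ih (d1.insert x [0, 0]) (d2.insert x 0)

lemma pv_getD_foldl_insert_const {K V : Type} [BEq K] [LawfulBEq K]
    (l : List K) (v0 dflt : V) (d : PySem.Dict K V) (k : K) :
    (l.foldl (fun d x => d.insert x v0) d).getD k dflt = if k ∈ l then v0 else d.getD k dflt := by
  induction l generalizing d with
  | nil => simp
  | cons x t ih =>
    simp only [List.foldl_cons]
    rw [ih]
    by_cases hkt : k ∈ t
    · simp [hkt]
    · by_cases hkx : k = x
      · subst hkx; simp [hkt, PySem.Dict.getD_insert_self]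
      · simp [hkt, hkx, PySem.Dict.getD_insert_of_ne _ _ _ hkx]

lemma pv_step_keys (i : Int) (c : Char) (q : PySem.Dict (Int × Int) (List Int) × PySem.Dict (Int × Int) Int)
    (se : Int × Int) (h1 : q.1.contains se = true) (h2 : q.2.contains se = true) :
    (pvAStep i c q se).1.keys = q.1.keys ∧ (pvAStep i c q se).2.keys = q.2.keys := by
  unfold pvAStep
  split_ifs with hg hb
  · exact ⟨PySem.Dict.keys_insert_of_contains _ _ h1, PySem.Dict.keys_insert_of_contains _ _ h2⟩
  · exact ⟨PySem.Dict.keys_insert_of_contains _ _ h1, rfl⟩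
  · exact ⟨rfl, rfl⟩

lemma pv_step_getD_self (i : Int) (c : Char) (q : PySem.Dict (Int × Int) (List Int) × PySem.Dict (Int × Int) Int)
    (se : Int × Int) :
    ((pvAStep i c q se).1.getD se [], (pvAStep i c q se).2.getD se 0)
      = pvSim se (q.1.getD se [], q.2.getD se 0) (i, c) := by
  unfold pvAStep pvSim pvM
  split_ifs with hg hb <;> simp [PySem.Dict.getD_insert_self]

lemma pv_step_getD_ne (i : Int) (c : Char) (q : PySem.Dict (Int × Int) (List Int) × PySem.Dict (Int × Int) Int)
    (se k : Int × Int) (hne : k ≠ se) :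
    (pvAStep i c q se).1.getD k [] = q.1.getD k [] ∧ (pvAStep i c q se).2.getD k 0 = q.2.getD k 0 := by
  unfold pvAStep
  split_ifs with hg hb <;>
    simp [PySem.Dict.getD_insert_of_ne _ _ _ hne]

lemma pv_inner (i : Int) (c : Char) (L : List (Int × Int)) :
    ∀ (q : PySem.Dict (Int × Int) (List Int) × PySem.Dict (Int × Int) Int),
    L.Nodup → (∀ x ∈ L, q.1.contains x = true) → (∀ x ∈ L, q.2.contains x = true) →
    ((L.foldl (pvAStep i c) q).1.keys = q.1.keys ∧ (L.foldl (pvAStep i c) q).2.keys = q.2.keys)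
    ∧ (∀ k ∈ L, ((L.foldl (pvAStep i c) q).1.getD k [], (L.foldl (pvAStep i c) q).2.getD k 0)
        = pvSim k (q.1.getD k [], q.2.getD k 0) (i, c))
    ∧ (∀ k, k ∉ L → (L.foldl (pvAStep i c) q).1.getD k [] = q.1.getD k []
        ∧ (L.foldl (pvAStep i c) q).2.getD k 0 = q.2.getD k 0) := by
  induction L with
  | nil => intro q _ _ _; exact ⟨⟨rfl, rfl⟩, by simp, fun k _ => ⟨rfl, rfl⟩⟩
  | cons x t ih =>
    intro q hnd h1 h2
    rw [List.nodup_cons] at hnd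
    obtain ⟨hxt, hndt⟩ := hnd
    have hk := pv_step_keys i c q x (h1 x (by simp)) (h2 x (by simp))
    have hc1 : ∀ y ∈ t, (pvAStep i c q x).1.contains y = true := by
      intro y hy
      rw [PySem.Dict.contains_iff_mem_keys, hk.1, ← PySem.Dict.contains_iff_mem_keys]
      exact h1 y (by simp [hy])
    have hc2 : ∀ y ∈ t, (pvAStep i c q x).2.contains y = true := by
      intro y hy
      rw [PySem.Dict.contains_iff_mem_keys, hk.2, ← PySem.Dict.contains_iff_mem_keys]
      exact h2 y (by simp [hy])
    obtain ⟨⟨K1, K2⟩, Hin, Hout⟩ := ih (pvAStep i c q x) hndt hc1 hc2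
    simp only [List.foldl_cons]
    refine ⟨⟨K1.trans hk.1, K2.trans hk.2⟩, ?_, ?_⟩
    · intro k hkmem
      rcases List.mem_cons.mp hkmem with rfl | hkt
      · have h0 := Hout k hxt
        rw [h0.1, h0.2]
        exact pv_step_getD_self i c q k
      · have hne : k ≠ x := fun hkx => hxt (hkx ▸ hkt)
        rw [Hin k hkt]
        have hne' := pv_step_getD_ne i c q x k hne
        rw [hne'.1, hne'.2]
    · intro k hk2
      have hne : k ≠ x := fun h => hk2 (by simp [h])
      have hkt : k ∉ t := fun h => hk2 (by simp [h])
      have h0 := Hout k hkt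
      have hstep := pv_step_getD_ne i c q x k hne
      exact ⟨h0.1.trans hstep.1, h0.2.trans hstep.2⟩

lemma pv_outer (K : List (Int × Int)) (hK : K.Nodup) :
    ∀ (cs : List Char) (i0 : Int) (q : PySem.Dict (Int × Int) (List Int) × PySem.Dict (Int × Int) Int),
    q.1.keys = K → q.2.keys = K →
    ((PySem.List.enumerate cs i0).foldl (fun q ic => q.1.keys.foldl (pvAStep ic.1 ic.2) q) q).1.keys = K
    ∧ ((PySem.List.enumerate cs i0).foldl (fun q ic => q.1.keys.foldl (pvAStep ic.1 ic.2) q) q).2.keys = K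
    ∧ ∀ k ∈ K,
      (((PySem.List.enumerate cs i0).foldl (fun q ic => q.1.keys.foldl (pvAStep ic.1 ic.2) q) q).1.getD k [],
       ((PySem.List.enumerate cs i0).foldl (fun q ic => q.1.keys.foldl (pvAStep ic.1 ic.2) q) q).2.getD k 0)
      = (PySem.List.enumerate cs i0).foldl (pvSim k) (q.1.getD k [], q.2.getD k 0) := by
  intro cs
  induction cs with
  | nil =>
    intro i0 q h1 h2
    refine ⟨?_, ?_, ?_⟩ <;> simp [PySem.List.enumerate_nil, h1, h2]
  | cons c cs ih =>
    intro i0 q h1 h2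
    rw [PySem.List.enumerate_cons]
    simp only [List.foldl_cons]
    have hcont1 : ∀ x ∈ K, q.1.contains x = true := by
      intro x hx; rw [PySem.Dict.contains_iff_mem_keys, h1]; exact hx
    have hcont2 : ∀ x ∈ K, q.2.contains x = true := by
      intro x hx; rw [PySem.Dict.contains_iff_mem_keys, h2]; exact hx
    rw [h1]
    obtain ⟨⟨hk1, hk2⟩, Hin, _⟩ := pv_inner i0 c K q hK hcont1 hcont2
    obtain ⟨H1, H2, H3⟩ := ih (i0 + 1) (K.foldl (pvAStep i0 c) q) (by rw [hk1, h1]) (by rw [hk2, h2])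
    refine ⟨H1, H2, ?_⟩
    intro k hk
    rw [H3 k hk, Hin k hk]

lemma pv_A_eq (text : String) (indices : List (Int × Int)) :
    contained_items_v4 text indices
      = (PySem.Set.ofList indices).map
          (fun k => (k.1, k.2, ((PySem.List.enumerate text.toList 0).foldl (pvSim k) ([0, 0], 0)).2)) := by
  simp only [contained_items_v4]
  rw [pv_init_split]
  have hkeys1 : (indices.foldl (fun (d : PySem.Dict (Int × Int) (List Int)) se => d.insert se [0, 0])
      PySem.Dict.empty).keys = PySem.Set.ofList indices :=
    PySem.Dict.keys_foldl_insert indices (fun _ _ => ([0, 0] : List Int)) PySem.Dict.empty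
  have hkeys2 : (indices.foldl (fun (d : PySem.Dict (Int × Int) Int) se => d.insert se 0)
      PySem.Dict.empty).keys = PySem.Set.ofList indices :=
    PySem.Dict.keys_foldl_insert indices (fun _ _ => (0 : Int)) PySem.Dict.empty
  obtain ⟨hK1, hK2, hpt⟩ := pv_outer (PySem.Set.ofList indices) (PySem.Set.nodup_ofList indices)
    text.toList 0
    (indices.foldl (fun (d : PySem.Dict (Int × Int) (List Int)) se => d.insert se [0, 0]) PySem.Dict.empty,
     indices.foldl (fun (d : PySem.Dict (Int × Int) Int) se => d.insert se 0) PySem.Dict.empty)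
    hkeys1 hkeys2
  rw [PySem.Dict.items_eq_map_keys _ (by rw [hK2]; exact PySem.Set.nodup_ofList indices) 0, hK2,
    List.map_map]
  apply List.map_congr_left
  intro k hk
  have hv := congrArg Prod.snd (hpt k hk)
  have hi1 : (indices.foldl (fun (d : PySem.Dict (Int × Int) (List Int)) se => d.insert se [0, 0])
      PySem.Dict.empty).getD k [] = [0, 0] := by
    rw [pv_getD_foldl_insert_const]
    simp [(PySem.Set.mem_ofList indices k).mp hk]
  have hi2 : (indices.foldl (fun (d : PySem.Dict (Int × Int) Int) se => d.insert se 0)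
      PySem.Dict.empty).getD k 0 = 0 := by
    rw [pv_getD_foldl_insert_const]
    simp [(PySem.Set.mem_ofList indices k).mp hk]
  rw [hi1, hi2] at hv
  simpa using hv

lemma pv_add_mem {K : Type} [BEq K] [LawfulBEq K] (s : List K) (x : K) (h : x ∈ s) :
    PySem.Set.add s x = s := by
  unfold PySem.Set.add
  rw [if_pos (by simpa using h)]

lemma pv_add_not_mem {K : Type} [BEq K] [LawfulBEq K] (s : List K) (x : K) (h : x ∉ s) :
    PySem.Set.add s x = s ++ [x] := by
  unfold PySem.Set.add
  rw [if_neg (by simpa using h)]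

lemma pv_B_fold (text : String) :
    ∀ (l : List (Int × Int)) (d : PySem.Dict (Int × Int) Int),
    (l.foldl (fun r key => if r.contains key then r else r.insert key (pvBVal text key)) d).keys
        = PySem.Set.update d.keys l
    ∧ ∀ k, ((d.contains k = false → k ∈ l →
          (l.foldl (fun r key => if r.contains key then r else r.insert key (pvBVal text key)) d).getD k 0
            = pvBVal text k)
        ∧ (d.contains k = true →
          (l.foldl (fun r key => if r.contains key then r else r.insert key (pvBVal text key)) d).getD k 0
            = d.getD k 0)) := by
  intro l
  induction l with
  | nil =>
    intro d
    exact ⟨rfl, fun k => ⟨fun _ h => absurd h (List.not_mem_nil), fun _ => rfl⟩⟩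
  | cons x t ih =>
    intro d
    simp only [List.foldl_cons]
    by_cases hc : d.contains x = true
    · rw [if_pos hc]
      obtain ⟨hkeys, hpt⟩ := ih d
      have hxk : x ∈ d.keys := (PySem.Dict.contains_iff_mem_keys d x).mp hc
      constructor
      · rw [hkeys]
        show PySem.Set.update d.keys t = PySem.Set.update (PySem.Set.add d.keys x) t
        rw [pv_add_mem _ _ hxk]
      · intro k
        refine ⟨?_, (hpt k).2⟩
        intro hdk hmem
        rcases List.mem_cons.mp hmem with rfl | hkt
        · rw [hc] at hdk; cases hdk
        · exact (hpt k).1 hdk hkt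
    · rw [if_neg (by simp [hc])]
      have hc' : d.contains x = false := by simpa using hc
      obtain ⟨hkeys, hpt⟩ := ih (d.insert x (pvBVal text x))
      have hxk : x ∉ d.keys := fun hx => hc ((PySem.Dict.contains_iff_mem_keys d x).mpr hx)
      constructor
      · rw [hkeys, PySem.Dict.keys_insert_of_not_contains _ _ hc']
        show PySem.Set.update (d.keys ++ [x]) t = PySem.Set.update (PySem.Set.add d.keys x) t
        rw [pv_add_not_mem _ _ hxk]
      · intro k
        constructor
        · intro hdk hmem
          by_cases hkx : k = x
          · subst hkx
            have hck : (d.insert k (pvBVal text k)).contains k = true := by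
              rw [PySem.Dict.contains_insert]; simp
            rw [(hpt k).2 hck, PySem.Dict.getD_insert_self]
          · have hkt : k ∈ t := by
              rcases List.mem_cons.mp hmem with h | h
              · exact absurd h hkx
              · exact h
            have hck : (d.insert x (pvBVal text x)).contains k = false := by
              rw [PySem.Dict.contains_insert]; simp [hkx, hdk]
            exact (hpt k).1 hck hkt
        · intro hdk
          have hkx : k ≠ x := fun h => by rw [h, hc'] at hdk; cases hdk
          have hck : (d.insert x (pvBVal text x)).contains k = true := by
            rw [PySem.Dict.contains_insert]; simp [hdk]
          rw [(hpt k).2 hck, PySem.Dict.getD_insert_of_ne _ _ _ hkx]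

lemma pv_B_eq (text : String) (indices : List (Int × Int)) :
    contained_items_v4_alt text indices
      = (PySem.Set.ofList indices).map (fun k => (k.1, k.2, pvBVal text k)) := by
  unfold contained_items_v4_alt
  obtain ⟨hkeys, hpt⟩ := pv_B_fold text indices PySem.Dict.empty
  have hK : (indices.foldl (fun r key => if r.contains key then r else r.insert key (pvBVal text key))
      PySem.Dict.empty).keys = PySem.Set.ofList indices := hkeys
  rw [PySem.Dict.items_eq_map_keys _ (by rw [hK]; exact PySem.Set.nodup_ofList indices) 0, hK,
    List.map_map]
  apply List.map_congr_left
  intro k hk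
  have hv := (hpt k).1 rfl ((PySem.Set.mem_ofList indices k).mp hk)
  simp [hv]

lemma pv_seg (s e : Int) :
    ∀ (cs : List Char) (i0 : Int) (st : List Int × Int),
    (PySem.List.enumerate cs i0).foldl (pvSim (s, e)) st
      = ((cs.drop (s - i0).toNat).take (e - max s i0).toNat).foldl pvM st := by
  intro cs
  induction cs with
  | nil => intro i0 st; simp [PySem.List.enumerate_nil]
  | cons c cs ih =>
    intro i0 st
    rw [PySem.List.enumerate_cons]
    simp only [List.foldl_cons]
    by_cases hg : s ≤ i0 ∧ i0 < e
    · have hstep : pvSim (s, e) st (i0, c) = pvM st c := by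
        unfold pvSim; rw [if_pos hg]
      rw [hstep, ih (i0 + 1) (pvM st c)]
      have hm1 : max s i0 = i0 := max_eq_right hg.1
      have hm2 : max s (i0 + 1) = i0 + 1 := max_eq_right (by omega)
      rw [hm1, hm2]
      have h1 : (s - i0).toNat = 0 := by omega
      have h2 : (s - (i0 + 1)).toNat = 0 := by omega
      have h3 : (e - i0).toNat = (e - (i0 + 1)).toNat + 1 := by omega
      rw [h1, h2, h3]
      simp [List.take_succ_cons]
    · have hstep : pvSim (s, e) st (i0, c) = st := by
        unfold pvSim; rw [if_neg hg]
      rw [hstep, ih (i0 + 1) st]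
      rcases not_and_or.mp hg with hs | he
      · have hs' : i0 < s := by omega
        have hm1 : max s i0 = s := max_eq_left (by omega)
        have hm2 : max s (i0 + 1) = s := max_eq_left (by omega)
        rw [hm1, hm2]
        have h1 : (s - i0).toNat = (s - (i0 + 1)).toNat + 1 := by omega
        rw [h1]
        simp [List.drop_succ_cons]
      · have he' : e ≤ i0 := by omega
        have h1 : (e - max s i0).toNat = 0 := by
          have := le_max_right s i0; omega
        have h2 : (e - max s (i0 + 1)).toNat = 0 := by
          have := le_max_right s (i0 + 1); omega
        rw [h1, h2]
        simp

lemma pv_tW_cut (c : Char) : ∀ (l r : List Char), (∀ x ∈ l, (x != c) = true) →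
    ((l ++ c :: r).takeWhile (· != c)) = l := by
  intro l
  induction l with
  | nil => intro r _; simp [List.takeWhile_cons]
  | cons a t ih =>
    intro r h
    have ha : (a != c) = true := h a (by simp)
    simp only [List.cons_append, List.takeWhile_cons, ha]
    simp [ih r (fun x hx => h x (by simp [hx]))]

lemma pv_tW_app_of_mem (c : Char) (l r : List Char) (h : c ∈ l) :
    (l ++ r).takeWhile (· != c) = l.takeWhile (· != c) := by
  induction l with
  | nil => cases h
  | cons a t ih =>
    by_cases hac : a = c
    · subst hac; simp [List.takeWhile_cons]
    · have ht : c ∈ t := by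
        rcases List.mem_cons.mp h with h' | h'
        · exact absurd h'.symm hac
        · exact h'
      have ha : (a != c) = true := by simpa using hac
      simp only [List.cons_append, List.takeWhile_cons, ha]
      simp [ih ht]

lemma pv_tW_lt (c : Char) : ∀ (l : List Char), c ∈ l → (l.takeWhile (· != c)).length < l.length := by
  intro l
  induction l with
  | nil => intro h; cases h
  | cons a t ih =>
    intro h
    by_cases hac : a = c
    · subst hac; simp [List.takeWhile_cons]
    · have ht : c ∈ t := by
        rcases List.mem_cons.mp h with h' | h'
        · exact absurd h'.symm hac
        · exact h'
      have ha : (a != c) = true := by simpa using hac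
      simp only [List.takeWhile_cons, ha, if_true, List.length_cons]
      simpa using ih ht

lemma pv_countP_all (c : Char) (l : List Char) (h : c ∉ l) : l.countP (· != c) = l.length := by
  rw [List.countP_eq_length]
  intro a ha
  have hac : a ≠ c := by rintro rfl; exact h ha
  simpa using hac

lemma pv_countP_count (c : Char) (l : List Char) : l.countP (· != c) + l.count c = l.length := by
  induction l with
  | nil => rfl
  | cons a t ih =>
    by_cases hac : a = c
    · subst hac
      simp only [List.countP_cons, List.count_cons]
      simp
      omega
    · have h1 : (a != c) = true := by simpa using hac
      have h2 : (a == c) = false := by simpa using hac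
      simp only [List.countP_cons, List.count_cons, h1, h2]
      simp
      omega

lemma pv_decomp (c : Char) (l : List Char) (h : c ∈ l) :
    ∃ A R, l = A ++ c :: R ∧ (∀ x ∈ A, (x != c) = true) ∧ l.takeWhile (· != c) = A := by
  have hd := List.takeWhile_append_dropWhile (p := (· != c)) (l := l)
  cases hdw : l.dropWhile (· != c) with
  | nil =>
    exfalso
    rw [hdw, List.append_nil] at hd
    have := List.mem_takeWhile_imp (hd ▸ h)
    simp at this
  | cons b R =>
    have hb : (b != c) = false := by
      have := List.head?_dropWhile_not (· != c) l
      rw [hdw] at this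
      simpa using this
    have hbc : b = c := by simpa using hb
    refine ⟨l.takeWhile (· != c), R, ?_, fun x hx => List.mem_takeWhile_imp (p := (· != c)) hx, rfl⟩
    have hsplit : l = l.takeWhile (· != c) ++ l.dropWhile (· != c) := hd.symm
    rw [hdw, hbc] at hsplit
    exact hsplit

lemma pv_machine : ∀ (l : List Char),
    l.foldl pvM ([0, 0], 0) =
      (if '|' ∈ l then [((l.reverse.takeWhile (· != '|')).length : Int), 1] else [0, 0],
       if '|' ∈ l then
         ((l.countP (· != '|') : Int) - (l.takeWhile (· != '|')).length - (l.reverse.takeWhile (· != '|')).length)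
       else 0) := by
  intro l
  induction l using List.reverseRecOn with
  | nil => simp
  | append_singleton l c ih =>
    rw [List.foldl_append, ih]
    simp only [List.foldl_cons, List.foldl_nil]
    by_cases hc : c = '|'
    · subst hc
      have hmem : '|' ∈ l ++ ['|'] := by simp
      have hrev : (l ++ ['|']).reverse = '|' :: l.reverse := by simp
      have htl : ((l ++ ['|']).reverse.takeWhile (· != '|')).length = 0 := by
        rw [hrev]; simp [List.takeWhile_cons]
      by_cases hl : '|' ∈ l
      · have htw : (l ++ ['|']).takeWhile (· != '|') = l.takeWhile (· != '|') :=
          pv_tW_app_of_mem '|' l ['|'] hl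
        have hcp : (l ++ ['|']).countP (· != '|') = l.countP (· != '|') := by
          simp [List.countP_append]
        rw [if_pos hl, if_pos hl, if_pos hmem, if_pos hmem, htl, htw, hcp]
        unfold pvM
        rw [if_pos rfl]
        refine congrArg₂ Prod.mk ?_ ?_
        · simp [PySem.List.pyGetD_zero_cons, PySem.List.pyGetD_ofNat']
          try push_cast
          try ring
          try omega
        · simp [PySem.List.pyGetD_zero_cons, PySem.List.pyGetD_ofNat']
          try push_cast
          try ring
          try omega
      · have htw : (l ++ ['|']).takeWhile (· != '|') = l := by
          have hfree : ∀ x ∈ l, (x != '|') = true := by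
            intro x hx
            have : x ≠ '|' := by rintro rfl; exact hl hx
            simpa using this
          exact pv_tW_cut '|' l [] hfree
        have hcp : (l ++ ['|']).countP (· != '|') = l.length := by
          rw [List.countP_append, pv_countP_all '|' l hl]; simp
        rw [if_neg hl, if_neg hl, if_pos hmem, if_pos hmem, htl, htw, hcp]
        unfold pvM
        rw [if_pos rfl]
        refine congrArg₂ Prod.mk ?_ ?_
        · simp [PySem.List.pyGetD_zero_cons, PySem.List.pyGetD_ofNat']
          try push_cast
          try ring
          try omega
        · simp [PySem.List.pyGetD_zero_cons, PySem.List.pyGetD_ofNat']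
          try push_cast
          try ring
          try omega
    · have hmem : ('|' ∈ l ++ [c]) ↔ '|' ∈ l := by
        constructor
        · intro h
          rcases List.mem_append.mp h with h' | h'
          · exact h'
          · exact absurd (List.mem_singleton.mp h').symm hc
        · intro h; exact List.mem_append.mpr (Or.inl h)
      have hrev : (l ++ [c]).reverse = c :: l.reverse := by simp
      have hcb : (c != '|') = true := by simpa using hc
      have htl : ((l ++ [c]).reverse.takeWhile (· != '|')).length
          = (l.reverse.takeWhile (· != '|')).length + 1 := by
        rw [hrev]
        simp [List.takeWhile_cons, hcb]
      by_cases hl : '|' ∈ l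
      · have htw : (l ++ [c]).takeWhile (· != '|') = l.takeWhile (· != '|') :=
          pv_tW_app_of_mem '|' l [c] hl
        have hcp : (l ++ [c]).countP (· != '|') = l.countP (· != '|') + 1 := by
          simp [List.countP_append, hcb]
        rw [if_pos hl, if_pos hl, if_pos (hmem.mpr hl), if_pos (hmem.mpr hl), htl, htw, hcp]
        unfold pvM
        rw [if_neg hc]
        refine congrArg₂ Prod.mk ?_ ?_
        · simp [PySem.List.pyGetD_zero_cons, PySem.List.pyGetD_ofNat']
          try push_cast
          try ring
          try omega
        · simp [PySem.List.pyGetD_zero_cons, PySem.List.pyGetD_ofNat']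
          try push_cast
          try ring
          try omega
      · rw [if_neg hl, if_neg hl, if_neg (fun h => hl (hmem.mp h)), if_neg (fun h => hl (hmem.mp h))]
        unfold pvM
        rw [if_neg hc]
        refine congrArg₂ Prod.mk ?_ ?_
        · simp [PySem.List.pyGetD_zero_cons, PySem.List.pyGetD_ofNat']
          try push_cast
          try ring
          try omega
        · simp [PySem.List.pyGetD_zero_cons, PySem.List.pyGetD_ofNat']
          try push_cast
          try ring
          try omega

lemma pv_singleton_prefix (c : Char) (m : List Char) : [c] <+: m ↔ m.head? = some c := by
  cases m with
  | nil => simp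
  | cons a t =>
    constructor
    · rintro ⟨u, hu⟩
      simp only [List.cons_append, List.nil_append, List.cons.injEq] at hu
      simp [hu.1]
    · intro h
      simp only [List.head?_cons, Option.some.injEq] at h
      exact ⟨t, by simp [h]⟩

lemma pv_singleton_infix (c : Char) (l : List Char) : [c] <:+: l ↔ c ∈ l := by
  constructor
  · intro h
    exact h.subset (by simp)
  · intro h
    obtain ⟨s, t, rfl⟩ := List.append_of_mem h
    exact ⟨s, t, by simp⟩

lemma pv_takeWhile_len (c : Char) :
    ∀ (l : List Char) (k : Nat), l[k]? = some c → (∀ i, i < k → l[i]? ≠ some c) →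
    (l.takeWhile (· != c)).length = k := by
  intro l
  induction l with
  | nil => intro k hk _; simp at hk
  | cons a t ih =>
    intro k hk hmin
    by_cases hac : a = c
    · subst hac
      cases k with
      | zero => simp [List.takeWhile_cons]
      | succ k' => exact absurd (by simp : (a :: t)[0]? = some a) (hmin 0 (by omega))
    · cases k with
      | zero => simp at hk; exact absurd hk hac
      | succ k' =>
        have ha : (a != c) = true := by simpa using hac
        simp only [List.takeWhile_cons, ha, if_true, List.length_cons]
        have h1 : t[k']? = some c := by simpa using hk
        have h2 : ∀ i, i < k' → t[i]? ≠ some c := by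
          intro i hi
          have := hmin (i + 1) (by omega)
          simpa using this
        simp [ih k' h1 h2]

lemma pv_find_singleton_mem (c : Char) (l : List Char) (h : c ∈ l) :
    PySem.Chars.find l [c] = ((l.takeWhile (· != c)).length : Int) := by
  have hinf : [c] <:+: l := (pv_singleton_infix c l).mpr h
  have hnn : 0 ≤ PySem.Chars.find l [c] := (PySem.Chars.find_nonneg_iff l [c]).mpr hinf
  obtain ⟨hpre, hmin⟩ := PySem.Chars.find_spec hnn
  have hk : l[(PySem.Chars.find l [c]).toNat]? = some c := by
    rw [← List.head?_drop]
    exact (pv_singleton_prefix c _).mp hpre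
  have hmin' : ∀ i, i < (PySem.Chars.find l [c]).toNat → l[i]? ≠ some c := by
    intro i hi hcon
    exact hmin i hi ((pv_singleton_prefix c _).mpr (by rw [List.head?_drop]; exact hcon))
  rw [pv_takeWhile_len c l _ hk hmin']
  omega

lemma pv_find_singleton_not (c : Char) (l : List Char) (h : c ∉ l) :
    PySem.Chars.find l [c] = -1 := by
  rw [PySem.Chars.find_eq_neg_one_iff]
  intro hcon
  exact h ((pv_singleton_infix c l).mp hcon)

lemma pv_count_go (c : Char) :
    ∀ (fuel : Nat) (l : List Char) (acc : Nat), l.length ≤ fuel →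
    PySem.Chars.count.go [c] fuel l acc = acc + l.count c := by
  intro fuel
  induction fuel with
  | zero =>
    intro l acc hl
    have : l = [] := List.eq_nil_of_length_eq_zero (by omega)
    subst this
    simp [PySem.Chars.count.go]
  | succ fuel ih =>
    intro l acc hl
    cases l with
    | nil => simp [PySem.Chars.count.go]
    | cons a t =>
      rw [PySem.Chars.count.go]
      by_cases hac : a = c
      · subst hac
        have hpre : [a].isPrefixOf (a :: t) = true := by simp [List.isPrefixOf]
        rw [if_pos hpre]
        simp only [List.length_cons] at hl
        simp only [List.length_cons, List.length_nil, Nat.zero_add, List.drop_succ_cons,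
          List.drop_zero]
        rw [ih t (acc + 1) (by omega)]
        simp [List.count_cons]
        omega
      · have hbeq : (a == c) = false := by simpa using hac
        have hpre : [c].isPrefixOf (a :: t) = false := by
          simp [List.isPrefixOf]
          rintro rfl
          exact hac rfl
        rw [if_neg (by simp [hpre])]
        simp only [List.length_cons] at hl
        rw [ih t acc (by omega)]
        simp [List.count_cons, hbeq]

lemma pv_count_singleton (l : List Char) (c : Char) : PySem.Chars.count l [c] = l.count c := by
  unfold PySem.Chars.count
  rw [if_neg (by simp)]
  simpa using pv_count_go c l.length l 0 le_rfl

lemma pv_between (l : List Char) (h : '|' ∈ l) :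
    (((l.drop ((l.takeWhile (· != '|')).length + 1)).take
        ((l.length - 1 - (l.reverse.takeWhile (· != '|')).length) - ((l.takeWhile (· != '|')).length + 1))).length : Int)
      - ((l.drop ((l.takeWhile (· != '|')).length + 1)).take
        ((l.length - 1 - (l.reverse.takeWhile (· != '|')).length) - ((l.takeWhile (· != '|')).length + 1))).count '|'
    = (l.countP (· != '|') : Int) - (l.takeWhile (· != '|')).length - (l.reverse.takeWhile (· != '|')).length := by
  obtain ⟨A, R, hl, hA, htwA⟩ := pv_decomp '|' l h
  by_cases hR : '|' ∈ R
  · have hRrev : '|' ∈ R.reverse := by simpa using hR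
    obtain ⟨B', M', hR2, hB', htwB'⟩ := pv_decomp '|' R.reverse hRrev
    have hRval : R = M'.reverse ++ '|' :: B'.reverse := by
      have := congrArg List.reverse hR2
      simpa using this
    subst hl
    rw [hRval] at *
    set M := M'.reverse
    set B := B'.reverse
    have hBfree : ∀ x ∈ B, (x != '|') = true := by
      intro x hx
      exact hB' x (by simpa [B] using hx)
    have hhd : ((A ++ '|' :: (M ++ '|' :: B)).takeWhile (· != '|')).length = A.length := by
      rw [pv_tW_cut '|' A _ hA]
    have hrev : (A ++ '|' :: (M ++ '|' :: B)).reverse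
        = B.reverse ++ '|' :: (M.reverse ++ '|' :: A.reverse) := by
      simp [List.reverse_append]
    have htl : ((A ++ '|' :: (M ++ '|' :: B)).reverse.takeWhile (· != '|')).length = B.length := by
      rw [hrev, pv_tW_cut '|' B.reverse _ (fun x hx => hBfree x (by simpa using hx))]
      simp
    have hlen : (A ++ '|' :: (M ++ '|' :: B)).length = A.length + 1 + (M.length + 1 + B.length) := by
      simp only [List.length_append, List.length_cons]
      omega
    rw [hhd, htl, hlen]
    have hdrop : (A ++ '|' :: (M ++ '|' :: B)).drop (A.length + 1) = M ++ '|' :: B := by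
      have heq : A ++ '|' :: (M ++ '|' :: B) = (A ++ ['|']) ++ (M ++ '|' :: B) := by simp
      rw [heq]
      have hlen2 : (A ++ ['|']).length = A.length + 1 := by simp
      rw [← hlen2, List.drop_left]
    have hamt : (A.length + 1 + (M.length + 1 + B.length) - 1 - B.length) - (A.length + 1) = M.length := by
      omega
    rw [hdrop, hamt]
    have htake : (M ++ '|' :: B).take M.length = M := List.take_left' rfl
    rw [htake]
    have hcp : (A ++ '|' :: (M ++ '|' :: B)).countP (· != '|')
        = A.length + (M.countP (· != '|') + B.length) := by
      have h1 : A.countP (· != '|') = A.length := List.countP_eq_length.mpr hA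
      have h2 : B.countP (· != '|') = B.length := List.countP_eq_length.mpr hBfree
      simp only [List.countP_append, List.countP_cons, h1, h2]
      simp
    rw [hcp]
    have hMc := pv_countP_count '|' M
    push_cast
    omega
  · subst hl
    have hhd : ((A ++ '|' :: R).takeWhile (· != '|')).length = A.length := by
      rw [pv_tW_cut '|' A _ hA]
    have hRfree : ∀ x ∈ R, (x != '|') = true := by
      intro x hx
      have : x ≠ '|' := by rintro rfl; exact hR hx
      simpa using this
    have hrev : (A ++ '|' :: R).reverse = R.reverse ++ '|' :: A.reverse := by
      simp [List.reverse_append]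
    have htl : ((A ++ '|' :: R).reverse.takeWhile (· != '|')).length = R.length := by
      rw [hrev, pv_tW_cut '|' R.reverse _ (fun x hx => hRfree x (by simpa using hx))]
      simp
    have hlen : (A ++ '|' :: R).length = A.length + 1 + R.length := by
      simp only [List.length_append, List.length_cons]
      omega
    rw [hhd, htl, hlen]
    have hamt : (A.length + 1 + R.length - 1 - R.length) - (A.length + 1) = 0 := by omega
    rw [hamt]
    simp only [List.take_zero, List.length_nil, List.count_nil]
    have hcp : (A ++ '|' :: R).countP (· != '|') = A.length + R.length := by
      have h1 : A.countP (· != '|') = A.length := List.countP_eq_length.mpr hA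
      have h2 : R.countP (· != '|') = R.length := List.countP_eq_length.mpr hRfree
      simp only [List.countP_append, List.countP_cons, h1, h2]
      simp
    rw [hcp]
    push_cast
    omega

lemma pv_toList_ofList (m : List Char) : (String.ofList m).toList = m := by simp

lemma pv_key_eq (text : String) (k : Int × Int) :
    ((PySem.List.enumerate text.toList 0).foldl (pvSim k) ([0, 0], 0)).2 = pvBVal text k := by
  obtain ⟨s, e⟩ := k
  have harg1 : (s - 0).toNat = (max s 0).toNat := by omega
  have harg2 : (e - max s 0).toNat = (max e 0).toNat - (max s 0).toNat := by omega
  rw [pv_seg s e text.toList 0 ([0, 0], 0), harg1, harg2]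
  set segL := ((text.toList.drop (max s 0).toNat).take ((max e 0).toNat - (max s 0).toNat)) with hsegL
  rw [pv_machine segL]
  have hseg : (PySem.Str.slice text (some (max s 0)) (some (max e 0))).toList = segL := by
    rw [PySem.Str.toList_slice, PySem.Chars.slice_eq_listSlice,
      PySem.List.slice_toNat text.toList (le_max_right s 0) (le_max_right e 0)]
  simp only [pvBVal]
  by_cases hmem : '|' ∈ segL
  · set H := (segL.takeWhile (· != '|')).length with hH
    set T := (segL.reverse.takeWhile (· != '|')).length with hT
    have hmemrev : '|' ∈ segL.reverse := by simpa using hmem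
    have hfind : PySem.Str.find (PySem.Str.slice text (some (max s 0)) (some (max e 0))) "|"
        = (H : Int) := by
      rw [PySem.Str.find_eq, hseg]
      exact pv_find_singleton_mem '|' segL hmem
    have hrevstr : (PySem.Str.slice? (PySem.Str.slice text (some (max s 0)) (some (max e 0)))
          none none (-1)).getD "" = String.ofList segL.reverse := by
      rw [PySem.Str.slice?_none_none_neg_one, Option.getD_some, hseg]
    have hfindrev : PySem.Str.find ((PySem.Str.slice? (PySem.Str.slice text (some (max s 0))
          (some (max e 0))) none none (-1)).getD "") "|" = (T : Int) := by
      rw [hrevstr, PySem.Str.find_eq, pv_toList_ofList]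
      exact pv_find_singleton_mem '|' segL.reverse hmemrev
    have hlen : PySem.Str.len (PySem.Str.slice text (some (max s 0)) (some (max e 0)))
        = (segL.length : Int) := by
      rw [PySem.Str.len_eq, hseg]
    have hTlt : T < segL.length := by
      have := pv_tW_lt '|' segL.reverse hmemrev
      simpa using this
    have ha1 : ((H : Int) + 1).toNat = H + 1 := by omega
    have ha2 : ((segL.length : Int) - 1 - (T : Int)).toNat = segL.length - 1 - T := by omega
    have hinner : (PySem.Str.slice (PySem.Str.slice text (some (max s 0)) (some (max e 0)))
          (some ((H : Int) + 1)) (some ((segL.length : Int) - 1 - (T : Int)))).toList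
        = (segL.drop (H + 1)).take ((segL.length - 1 - T) - (H + 1)) := by
      rw [PySem.Str.toList_slice, PySem.Chars.slice_eq_listSlice, hseg,
        PySem.List.slice_toNat segL (by omega) (by omega), ha1, ha2]
    have hlenin : PySem.Str.len (PySem.Str.slice (PySem.Str.slice text (some (max s 0)) (some (max e 0)))
          (some ((H : Int) + 1)) (some ((segL.length : Int) - 1 - (T : Int))))
        = (((segL.drop (H + 1)).take ((segL.length - 1 - T) - (H + 1))).length : Int) := by
      rw [PySem.Str.len_eq, hinner]
    have hcount : PySem.Str.count (PySem.Str.slice (PySem.Str.slice text (some (max s 0)) (some (max e 0)))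
          (some ((H : Int) + 1)) (some ((segL.length : Int) - 1 - (T : Int)))) "|"
        = ((segL.drop (H + 1)).take ((segL.length - 1 - T) - (H + 1))).count '|' := by
      rw [PySem.Str.count_eq, hinner]
      exact pv_count_singleton _ '|'
    rw [if_pos hmem, hfind, if_neg (by omega : ¬((H : Int) = -1)), hlen, hfindrev, hlenin, hcount]
    exact (pv_between segL hmem).symm
  · have hfind : PySem.Str.find (PySem.Str.slice text (some (max s 0)) (some (max e 0))) "|" = -1 := by
      rw [PySem.Str.find_eq, hseg]
      exact pv_find_singleton_not '|' segL hmem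
    rw [if_neg hmem, hfind, if_pos rfl]

-- ===== VERDICT (by name: the statement is the Claim_ definition above) =====
theorem contained_items_v4_spec : Claim_equal_contained_items_v4 := by
  intro text indices _dom
  unfold Spec_contained_items_v4
  rw [pv_A_eq, pv_B_eq]
  exact (List.map_congr_left (fun k _ => by rw [pv_key_eq])).symm
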